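-- pv_equiv track=rewrite | github.com/Vaibhav-Arora-2182/Leet-Code-Submissions | Smallest_Missing_Non_negative_Integer_After_Operations.py | findSmallestInteger
-- ===== SOURCE A (Python) =====
-- from typing import List
--
-- def findSmallestInteger(nums: List[int], value: int) -> int:
--     """
--     Finds the maximum achievable MEX after applying +value or -value operations.
--
--     Steps:
--     1. Compute frequency of each remainder (mod value).
--     2. Iterate i from 0 upward:
--         - For each i, check the remainder i % value.
--         - Decrease its count by 1.
--         - If any remainder count goes below zero, that `i` is the maximum MEX.
--     """
--     n = len(nums)
--     mod = [0] * value
--     for x in nums: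
--         x %= value
--         if x < 0:
--             x += value
--         mod[x] += 1
--     for i in range(n):
--         j = i % value
--         mod[j] -= 1
--         if mod[j] < 0:
--             return i
--     return n
-- ===== SOURCE B (Python) =====
-- def findSmallestInteger(nums, value):
--     cnt = {}
--     for x in nums:
--         r = x % value
--         cnt[r] = cnt.get(r, 0) + 1
--     return min(r + cnt.get(r, 0) * value for r in range(value))
-- ===== Notes on version B (the rewrite author's own statement) =====
-- stated objective: simpler
-- what changed: Replaces A's O(n) incremental decrement loop over indices 0..n-1 by the closed form min over residues r of r + count[r]*value (residue r first runs out at index r + count[r]*value, and that minimum never exceeds n), with the remainder table as a dict built in one pass.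
-- outside the precondition, e.g. on findSmallestInteger([], 0): A returns 0, B raises ValueError; on findSmallestInteger([], -2): A returns 0, B raises ValueError
import Mathlib
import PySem

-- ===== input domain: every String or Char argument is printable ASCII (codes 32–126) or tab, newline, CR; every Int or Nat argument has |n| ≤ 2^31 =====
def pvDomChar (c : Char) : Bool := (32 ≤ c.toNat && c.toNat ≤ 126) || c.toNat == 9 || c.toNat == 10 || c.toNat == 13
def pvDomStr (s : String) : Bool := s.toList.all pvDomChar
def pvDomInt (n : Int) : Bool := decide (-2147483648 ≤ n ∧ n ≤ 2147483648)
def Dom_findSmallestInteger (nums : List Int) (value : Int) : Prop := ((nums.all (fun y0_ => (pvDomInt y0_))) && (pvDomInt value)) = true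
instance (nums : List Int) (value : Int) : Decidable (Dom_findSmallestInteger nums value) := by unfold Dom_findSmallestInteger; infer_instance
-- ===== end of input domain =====

-- B replaces A's incremental index-by-index decrement loop with the closed form
-- min over residues r of r + count[r]*value (a dict of remainder counts built in one pass);
-- objective: simpler.


-- ===== PORT A =====
-- 'x %= value; if x < 0: x += value; mod[x] += 1'. Under Pre_ (1 ≤ value) the index is always
-- in range, so mod[x] += 1 / mod[j] -= 1 are ported with the total forms pySetD/pyGetD
-- (outside Pre_ the Python raises ZeroDivisionError/IndexError — excluded).
def buildModA (value : Int) (mod : List Int) (x : Int) : List Int :=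
  let x := PySem.Int.mod x value
  let x := if x < 0 then x + value else x
  PySem.List.pySetD mod x (PySem.List.pyGetD mod x 0 + 1)

-- 'for i in range(n): j = i % value; mod[j] -= 1; if mod[j] < 0: return i / return n'
def loopA (value : Int) (n : Int) : List Int → List Int → Int
  | _,   []        => n
  | mod, i :: rest =>
    let j := PySem.Int.mod i value
    let mod' := PySem.List.pySetD mod j (PySem.List.pyGetD mod j 0 - 1)
    if PySem.List.pyGetD mod' j 0 < 0 then i else loopA value n mod' rest

def findSmallestInteger (nums : List Int) (value : Int) : Int :=
  let n : Int := nums.length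
  let mod0 : List Int := List.replicate value.toNat 0   -- [0] * value
  let mod1 := nums.foldl (buildModA value) mod0
  loopA value n mod1 (PySem.List.pyRange 0 n 1)

-- ===== PORT B =====
-- cnt = {}; for x in nums: cnt[x % value] = cnt.get(x % value, 0) + 1
-- return min(r + cnt.get(r, 0) * value for r in range(value))
-- (min() of the empty generator raises ValueError — value ≤ 0 is excluded by Pre_; .getD 0 is that case)
def findSmallestInteger_alt (nums : List Int) (value : Int) : Int :=
  let cnt : PySem.Dict Int Int :=
    nums.foldl (fun d x =>
      let r := PySem.Int.mod x value
      d.insert r (d.getD r 0 + 1)) PySem.Dict.empty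
  (PySem.List.min? ((PySem.List.pyRange 0 value 1).map
      (fun r => r + cnt.getD r 0 * value)) (fun y => y)).getD 0

-- ===== PRECONDITION & SPEC =====
-- Pre_ excludes value ≤ 0: there A raises (ZeroDivisionError for value == 0, IndexError for
-- value < 0) whenever nums is nonempty, and on the remaining inputs (nums == []) B's own
-- min() over an empty range raises ValueError, so those inputs are excluded as well.
def Pre_findSmallestInteger (nums : List Int) (value : Int) : Prop := 1 ≤ value
instance (nums : List Int) (value : Int) : Decidable (Pre_findSmallestInteger nums value) := by
  unfold Pre_findSmallestInteger; infer_instance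

def pvWitness_findSmallestInteger : List Int × Int := ([1, 2, 4], 3)

def Spec_findSmallestInteger (nums : List Int) (value : Int) (out : Int) : Prop := out = findSmallestInteger_alt nums value
instance (nums : List Int) (value : Int) (out : Int) : Decidable (Spec_findSmallestInteger nums value out) := by unfold Spec_findSmallestInteger; infer_instance

-- ===== CLAIM (what is proved, stated in full; the proofs are below) =====
def Claim_equal_findSmallestInteger : Prop := ∀ (nums : List Int) (value : Int), Dom_findSmallestInteger nums value → Pre_findSmallestInteger nums value → Spec_findSmallestInteger nums value (findSmallestInteger nums value)

-- ===== LEMMAS AND PROOFS =====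

-- Number of indices k ∈ [0, a) with k % v = r (maintained incrementally, as A's loop visits them).
def pvVis (v : Nat) : Nat → Nat → Nat
  | 0,     _ => 0
  | a + 1, r => pvVis v a r + (if a % v = r then 1 else 0)

-- How many elements of l fall in residue class r (mod v).
def pvCnt (v : Nat) (l : List Int) (r : Nat) : Nat :=
  l.countP (fun x => PySem.Int.mod x (v : Int) == (r : Int))

lemma pvDiv (v q s : Nat) (hv : 0 < v) (hs : s < v) : (v * q + s) / v = q := by
  simp [Nat.mul_add_div hv, Nat.div_eq_of_lt hs]

lemma pvVis_formula (v : Nat) (hv : 0 < v) (a r : Nat) (hr : r < v) :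
    pvVis v a r = (a + v - 1 - r) / v := by
  induction a with
  | zero => simp [pvVis, Nat.div_eq_of_lt (by omega : v - 1 - r < v)]
  | succ a ih =>
    have hq : v * (a / v) + a % v = a := Nat.div_add_mod a v
    have hs : a % v < v := Nat.mod_lt _ hv
    rw [pvVis, ih]
    by_cases h : a % v = r
    · have h1 : a + 1 + v - 1 - r = v * (a / v + 1) := by rw [Nat.mul_add, Nat.mul_one]; omega
      have h0 : a + v - 1 - r = v * (a / v) + (v - 1) := by omega
      rw [h1, h0, pvDiv v _ _ hv (by omega), Nat.mul_div_cancel_left _ hv]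
      simp [h]
    · rcases Nat.lt_or_ge (a % v) r with hlt | hge
      · have h1 : a + 1 + v - 1 - r = v * (a / v) + (a % v + v - r) := by omega
        have h0 : a + v - 1 - r = v * (a / v) + (a % v + v - 1 - r) := by omega
        rw [h1, h0, pvDiv v _ _ hv (by omega), pvDiv v _ _ hv (by omega)]
        simp [h]
      · have hgt : r < a % v := by omega
        have h1 : a + 1 + v - 1 - r = v * (a / v + 1) + (a % v - r) := by
          rw [Nat.mul_add, Nat.mul_one]; omega
        have h0 : a + v - 1 - r = v * (a / v + 1) + (a % v - 1 - r) := by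
          rw [Nat.mul_add, Nat.mul_one]; omega
        rw [h1, h0, pvDiv v _ _ hv (by omega), pvDiv v _ _ hv (by omega)]
        simp [h]

lemma pvVis_self (v : Nat) (hv : 0 < v) (a : Nat) :
    pvVis v a (a % v) = a / v := by
  have hq := Nat.div_add_mod a v
  have hs : a % v < v := Nat.mod_lt _ hv
  rw [pvVis_formula v hv a _ hs]
  have h0 : a + v - 1 - a % v = v * (a / v) + (v - 1) := by omega
  rw [h0, pvDiv v _ _ hv (by omega)]

lemma pvBuildA (v : Nat) (hv : 0 < v) (t : List Int) (ht : t.length = v) (x : Int) :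
    (buildModA (v : Int) t x).length = v ∧
    ∀ r : Nat, r < v → (buildModA (v : Int) t x).getD r 0 =
      t.getD r 0 + (if PySem.Int.mod x (v : Int) == (r : Int) then 1 else 0) := by
  have hvz : (0 : Int) < (v : Int) := by exact_mod_cast hv
  have hnn := PySem.Int.mod_nonneg x hvz
  have hlt := PySem.Int.mod_lt x hvz
  have hmn : PySem.Int.mod x (v : Int) = (((PySem.Int.mod x (v : Int)).toNat : Nat) : Int) := by omega
  have hmlt : (PySem.Int.mod x (v : Int)).toNat < v := by omega
  simp only [buildModA, if_neg (by omega : ¬ PySem.Int.mod x (v : Int) < 0)]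
  rw [hmn, PySem.List.pySetD_natCast, PySem.List.pyGetD_natCast]
  constructor
  · simpa using ht
  · intro r hr
    by_cases hrm : r = (PySem.Int.mod x (v : Int)).toNat
    · subst hrm
      rw [if_pos (by simp [← hmn])]
      simp [List.getD, ht, hmlt]
    · rw [if_neg (by rw [beq_iff_eq]; omega)]
      simp [List.getD, List.getElem?_set_ne (by omega : (PySem.Int.mod x (v:Int)).toNat ≠ r)]

lemma pvTableA (v : Nat) (hv : 0 < v) (l : List Int) :
    ∀ t : List Int, t.length = v →
    (l.foldl (buildModA (v : Int)) t).length = v ∧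
    ∀ r : Nat, r < v → (l.foldl (buildModA (v : Int)) t).getD r 0 =
      t.getD r 0 + (pvCnt v l r : Int) := by
  induction l with
  | nil => intro t ht; simpa [pvCnt] using ht
  | cons x l ih =>
    intro t ht
    obtain ⟨hlen, hget⟩ := pvBuildA v hv t ht x
    obtain ⟨hlen', hget'⟩ := ih _ hlen
    refine ⟨by simpa using hlen', ?_⟩
    intro r hr
    rw [List.foldl_cons, hget' r hr, hget r hr]
    simp [pvCnt, List.countP_cons]
    split_ifs <;> push_cast <;> ring

lemma pvDictB (value : Int) (l : List Int) :
    ∀ (d : PySem.Dict Int Int) (r : Int),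
    (l.foldl (fun d x =>
      let r := PySem.Int.mod x value
      d.insert r (d.getD r 0 + 1)) d).getD r 0 =
    d.getD r 0 + (l.countP (fun x => PySem.Int.mod x value == r) : Int) := by
  induction l with
  | nil => intro d r; simp
  | cons x l ih =>
    intro d r
    rw [List.foldl_cons, ih]
    simp only [PySem.Dict.getD_insert, List.countP_cons]
    by_cases h : r = PySem.Int.mod x value
    · rw [if_pos h, if_pos (by simp [h]), h]; push_cast; ring
    · rw [if_neg h, if_neg (by simpa using fun hh => h hh.symm)]; push_cast; ring

lemma pvSum (v : Nat) (hv : 0 < v) (l : List Int) :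
    ∑ r ∈ Finset.range v, pvCnt v l r = l.length := by
  induction l with
  | nil => simp [pvCnt]
  | cons x l ih =>
    have hvz : (0 : Int) < (v : Int) := by exact_mod_cast hv
    have hnn := PySem.Int.mod_nonneg x hvz
    have hlt := PySem.Int.mod_lt x hvz
    set m : Int := PySem.Int.mod x (v : Int) with hm
    have hmlt : m.toNat < v := by omega
    simp only [pvCnt, List.countP_cons] at *
    rw [Finset.sum_add_distrib, ih]
    have hone : (∑ r ∈ Finset.range v,
        if (PySem.Int.mod x (v : Int) == (r : Int)) = true then 1 else 0) = 1 := by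
      rw [Finset.sum_congr rfl (fun r _ => ?_), Finset.sum_ite_eq' (Finset.range v) m.toNat (fun _ => 1)]
      · simp [Finset.mem_range, hmlt]
      · have : (PySem.Int.mod x (v : Int) == (r : Int)) = decide (r = m.toNat) := by
          rw [← hm]; simp [BEq.beq]; omega
        rw [this]; simp
    rw [hone]; simp
lemma pvPig (v : Nat) (hv : 0 < v) (l : List Int) :
    ∃ r : Nat, r < v ∧ r + pvCnt v l r * v ≤ l.length := by
  by_contra hcon
  push_neg at hcon
  have hfib : ∀ r ∈ Finset.range v,
      ((Finset.range (l.length + 1)).filter (fun i => i % v = r)).card ≤ pvCnt v l r := by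
    intro r hr
    rw [Finset.mem_range] at hr
    have := Finset.card_le_card_of_injOn (s := (Finset.range (l.length + 1)).filter (fun i => i % v = r))
      (t := Finset.range (pvCnt v l r)) (fun i => i / v)
      (by
        intro i hi
        simp only [Finset.coe_filter, Set.mem_setOf_eq, Finset.mem_range, Finset.mem_coe] at hi ⊢
        obtain ⟨hi1, hi2⟩ := hi
        have hkey := hcon r hr
        have hq : v * (i / v) + i % v = i := Nat.div_add_mod i v
        by_contra hge
        push_neg at hge
        have hmul : pvCnt v l r * v ≤ v * (i / v) := by
          rw [Nat.mul_comm v (i / v)]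
          exact Nat.mul_le_mul_right v hge
        omega)
      (by
        intro i hi j hj hij
        simp only [Finset.coe_filter, Set.mem_setOf_eq, Finset.mem_range] at hi hj
        simp only at hij
        have hqi : v * (i / v) + i % v = i := Nat.div_add_mod i v
        have hqj : v * (j / v) + j % v = j := Nat.div_add_mod j v
        rw [hij] at hqi
        omega)
    simpa using this
  have htot : (Finset.range (l.length + 1)).card =
      ∑ r ∈ Finset.range v, ((Finset.range (l.length + 1)).filter (fun i => i % v = r)).card :=
    Finset.card_eq_sum_card_fiberwise (fun i _ => Finset.mem_range.mpr (Nat.mod_lt _ hv))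
  have hle : l.length + 1 ≤ ∑ r ∈ Finset.range v, pvCnt v l r := by
    calc l.length + 1 = (Finset.range (l.length + 1)).card := by simp
      _ = ∑ r ∈ Finset.range v, ((Finset.range (l.length + 1)).filter (fun i => i % v = r)).card := htot
      _ ≤ ∑ r ∈ Finset.range v, pvCnt v l r := Finset.sum_le_sum hfib
  rw [pvSum v hv l] at hle
  omega

lemma pvLoop (v : Nat) (hv : 0 < v) (c : Nat → Nat) (n : Int) (M : Int)
    (hMmem : ∃ r : Nat, r < v ∧ M = (r : Int) + (c r : Int) * (v : Int))
    (hMmin : ∀ r : Nat, r < v → M ≤ (r : Int) + (c r : Int) * (v : Int))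
    (hMn : M ≤ n) :
    ∀ (k a : Nat), (a : Int) + k = n → (a : Int) ≤ M →
    ∀ t : List Int, t.length = v →
    (∀ r : Nat, r < v → t.getD r 0 = (c r : Int) - (pvVis v a r : Int)) →
    loopA (v : Int) n t (PySem.List.pyRange (a : Int) n 1) = if M < n then M else n := by
  intro k
  induction k with
  | zero =>
    intro a hk ha t ht hinv
    have han : (a : Int) = n := by omega
    have hMeq : M = n := le_antisymm hMn (han ▸ ha)
    rw [PySem.List.pyRange_one_eq_nil (by omega)]
    simp [loopA, hMeq]
  | succ k ih =>
    intro a hk ha t ht hinv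
    have haltn : (a : Int) < n := by omega
    rw [PySem.List.pyRange_one_cons haltn]
    have hsv : a % v < v := Nat.mod_lt _ hv
    have hmodcast : PySem.Int.mod (a : Int) (v : Int) = ((a % v : Nat) : Int) :=
      PySem.Int.mod_natCast a v
    have hread : (t.set (a % v) (t.getD (a % v) 0 - 1)).getD (a % v) 0 = t.getD (a % v) 0 - 1 := by
      simp [List.getD, ht, hsv]
    have hgetj : t.getD (a % v) 0 = (c (a % v) : Int) - (a / v : Nat) := by
      rw [hinv _ hsv, pvVis_self v hv a]
    by_cases hMa : (a : Int) = M
    · -- the trigger step: A returns a = M here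
      obtain ⟨r, hr, hMr⟩ := hMmem
      have haN : a = r + c r * v := by
        have : (a : Int) = ((r + c r * v : Nat) : Int) := by push_cast; omega
        exact_mod_cast this
      have hjr : a % v = r := by
        rw [haN, Nat.add_mul_mod_self_right, Nat.mod_eq_of_lt hr]
      have hdiv : a / v = c r := by
        rw [haN, Nat.add_mul_div_right _ _ hv, Nat.div_eq_of_lt hr]
        omega
      show (if _ < 0 then _ else _) = _
      rw [hmodcast, PySem.List.pySetD_natCast, PySem.List.pyGetD_natCast,
        PySem.List.pyGetD_natCast, hread, hgetj, hjr, hdiv]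
      rw [if_pos (show ((c r : Int) - (c r : Int) - 1 < 0) by omega),
        if_pos (show M < n by omega)]
      exact hMa
    · -- no trigger: a < M
      have haM : (a : Int) < M := lt_of_le_of_ne ha hMa
      have hnotrig : (a / v : Nat) < c (a % v) := by
        have hmin := hMmin _ hsv
        have hq : v * (a / v) + a % v = a := Nat.div_add_mod a v
        by_contra hge
        push_neg at hge
        have h1 : (c (a % v) : Int) * v ≤ ((a / v : Nat) : Int) * v := by
          have : (c (a % v) : Int) ≤ ((a / v : Nat) : Int) := by exact_mod_cast hge
          exact mul_le_mul_of_nonneg_right this (by positivity)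
        have hq2 : a % v + a / v * v = a := by rw [Nat.mul_comm]; omega
        have h2 : ((a % v : Nat) : Int) + ((a / v : Nat) : Int) * (v : Int) = (a : Int) := by
          exact_mod_cast hq2
        omega
      show (if _ < 0 then _ else _) = _
      rw [hmodcast, PySem.List.pySetD_natCast, PySem.List.pyGetD_natCast,
        PySem.List.pyGetD_natCast, hread, hgetj]
      rw [if_neg (by omega)]
      have hstep : ((a : Int) + 1) = ((a + 1 : Nat) : Int) := by push_cast; ring
      rw [hstep]
      apply ih (a + 1) (by push_cast; omega) (by push_cast; omega)
      · simpa using ht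
      · intro r hr
        by_cases hrj : r = a % v
        · subst hrj
          have hL : (t.set (a % v) ((c (a % v) : Int) - ((a / v : Nat) : Int) - 1)).getD (a % v) 0
              = (c (a % v) : Int) - ((a / v : Nat) : Int) - 1 := by
            simp [List.getD, ht, hsv]
          rw [hL, show pvVis v (a + 1) (a % v) = a / v + 1 from by
            simp [pvVis, pvVis_self v hv a]]
          push_cast; ring
        · have hL : (t.set (a % v) ((c (a % v) : Int) - ((a / v : Nat) : Int) - 1)).getD r 0
              = t.getD r 0 := by
            simp [List.getD, List.getElem?_set_ne (by omega : a % v ≠ r)]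
          rw [hL, hinv _ hr, show pvVis v (a + 1) r = pvVis v a r from by
            simp [pvVis, Ne.symm hrj]]

-- ===== VERDICT (by name: the statement is the Claim_ definition above) =====
theorem findSmallestInteger_spec : Claim_equal_findSmallestInteger := by
  intro nums value hdom hpre
  unfold Pre_findSmallestInteger at hpre
  unfold Spec_findSmallestInteger
  obtain ⟨v, rfl⟩ : ∃ v : Nat, value = (v : Int) := ⟨value.toNat, by omega⟩
  have hv : 0 < v := by exact_mod_cast hpre
  -- B's dict of counts agrees with pvCnt
  have hcnt : ∀ r : Int,
      (nums.foldl (fun d x =>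
        let r := PySem.Int.mod x (v : Int)
        d.insert r (d.getD r 0 + 1)) PySem.Dict.empty).getD r 0
      = (nums.countP (fun x => PySem.Int.mod x (v : Int) == r) : Int) := by
    intro r
    simpa using pvDictB (v : Int) nums PySem.Dict.empty r
  -- B's value: the minimum m of the mapped range
  set L : List Int := (PySem.List.pyRange 0 (v : Int) 1).map
    (fun r => r + (nums.foldl (fun d x =>
        let r := PySem.Int.mod x (v : Int)
        d.insert r (d.getD r 0 + 1)) PySem.Dict.empty).getD r 0 * (v : Int)) with hL
  have hLne : L ≠ [] := by
    intro hnil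
    have := congrArg List.length hnil
    simp [hL, PySem.List.length_pyRange_one] at this
    omega
  obtain ⟨m, hm⟩ : ∃ m, PySem.List.min? L (fun y => y) = some m := by
    rcases h : PySem.List.min? L (fun y => y) with _ | m
    · exact absurd ((PySem.List.min?_eq_none_iff L (fun y => y)).mp h) hLne
    · exact ⟨m, rfl⟩
  have hB : findSmallestInteger_alt nums (v : Int) = m := by
    simp only [findSmallestInteger_alt, ← hL, hm, Option.getD_some]
  -- characterize m
  have hMmem : ∃ r : Nat, r < v ∧ m = (r : Int) + (pvCnt v nums r : Int) * (v : Int) := by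
    obtain ⟨r, hrmem, hfr⟩ := List.mem_map.mp (PySem.List.min?_mem hm)
    obtain ⟨hr0, hrv⟩ := PySem.List.mem_pyRange_one.mp hrmem
    refine ⟨r.toNat, by omega, ?_⟩
    rw [← hfr, hcnt r]
    have hrc : r = ((r.toNat : Nat) : Int) := by omega
    rw [hrc]
    rfl
  have hMmin : ∀ r : Nat, r < v → m ≤ (r : Int) + (pvCnt v nums r : Int) * (v : Int) := by
    intro r hr
    have hmem : ((r : Int) + (pvCnt v nums r : Int) * (v : Int)) ∈ L := by
      rw [hL]
      refine List.mem_map.mpr ⟨(r : Int), PySem.List.mem_pyRange_one.mpr ⟨by positivity, by exact_mod_cast hr⟩, ?_⟩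
      rw [hcnt]
      rfl
    exact PySem.List.min?_isMin hm _ hmem
  have hMn : m ≤ (nums.length : Int) := by
    obtain ⟨r, hr, hle⟩ := pvPig v hv nums
    calc m ≤ (r : Int) + (pvCnt v nums r : Int) * (v : Int) := hMmin r hr
      _ = ((r + pvCnt v nums r * v : Nat) : Int) := by push_cast; ring
      _ ≤ (nums.length : Int) := by exact_mod_cast hle
  have hm0 : (0 : Int) ≤ m := by
    obtain ⟨r, hr, hmr⟩ := hMmem
    have : (0 : Int) ≤ (r : Int) + (pvCnt v nums r : Int) * (v : Int) := by positivity
    omega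
  -- A's value via the loop lemma
  obtain ⟨htlen, htget⟩ := pvTableA v hv nums (List.replicate v 0) (by simp)
  have hA : findSmallestInteger nums (v : Int) =
      loopA (v : Int) (nums.length : Int) (nums.foldl (buildModA (v : Int)) (List.replicate v 0))
        (PySem.List.pyRange ((0 : Nat) : Int) (nums.length : Int) 1) := by
    simp only [findSmallestInteger, Int.toNat_natCast, Nat.cast_zero]
  rw [hA, pvLoop v hv (pvCnt v nums) (nums.length : Int) m hMmem hMmin hMn nums.length 0
    (by simp) (by simpa using hm0) _ htlen
    (fun r hr => by rw [htget r hr]; simp [pvVis]), hB]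
  split_ifs with h
  · rfl
  · omega
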